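-- pv_equiv track=rewrite | github.com/RayanLebec/GameOfGraphs | game_of_graphs.py | find_close_friend_conspirator
-- ===== SOURCE A (Python) =====
-- def find_close_friend_conspirator(conspiracies, conspirators, distances, n):
--     close_friends = [friend for friend, distance in distances.items() if distance <= n and distance > 0]
--     close_friend_conspirators = {}
--
--     for conspirator in conspirators:
--         for close_friend in close_friends:
--             if close_friend in conspiracies and conspirator in conspiracies[close_friend]:
--                 close_friend_conspirators[conspirator] = close_friend
--     return close_friend_conspirators
-- ===== SOURCE B (Python) =====
-- def find_close_friend_conspirator(conspiracies, conspirators, distances, n):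
--     want = set(conspirators)
--     best = {}
--     for friend, distance in distances.items():
--         if 0 < distance <= n and friend in conspiracies:
--             for member in conspiracies[friend]:
--                 if member in want:
--                     best[member] = friend
--     return {c: best[c] for c in conspirators if c in best}
-- ===== Notes on version B (the rewrite author's own statement) =====
-- stated objective: faster
-- what changed: B makes a single pass over distances, visiting only the members of each close friend's conspiracy against a conspirator set and keeping the last match per member, then re-emits the mapping in conspirators order, instead of A's nested scan of all close friends for every conspirator.
import Mathlib
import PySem

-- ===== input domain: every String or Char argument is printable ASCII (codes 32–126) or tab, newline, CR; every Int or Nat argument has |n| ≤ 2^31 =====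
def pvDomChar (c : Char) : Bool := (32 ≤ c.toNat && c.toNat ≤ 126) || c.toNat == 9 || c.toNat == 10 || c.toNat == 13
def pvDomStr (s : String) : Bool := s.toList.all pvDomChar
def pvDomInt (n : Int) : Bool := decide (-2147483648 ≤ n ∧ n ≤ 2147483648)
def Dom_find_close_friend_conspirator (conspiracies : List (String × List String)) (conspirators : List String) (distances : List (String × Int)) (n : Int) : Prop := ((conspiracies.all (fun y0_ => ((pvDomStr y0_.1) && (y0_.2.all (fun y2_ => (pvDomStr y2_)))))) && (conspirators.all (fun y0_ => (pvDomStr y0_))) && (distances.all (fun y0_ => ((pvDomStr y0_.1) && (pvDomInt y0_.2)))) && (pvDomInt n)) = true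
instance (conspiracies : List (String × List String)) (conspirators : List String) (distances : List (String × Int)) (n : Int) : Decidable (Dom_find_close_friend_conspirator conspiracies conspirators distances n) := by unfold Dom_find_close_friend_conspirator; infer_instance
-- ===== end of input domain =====

-- B makes one pass over distances and visits only conspiracy members, instead of scanning every
-- close friend once per conspirator (objective: faster); return value only, no mutation involved.

-- ===== PORT A =====
-- shared helper: first-match association lookup = Python's 'k in d' / 'd[k]' on the conspiracies dict
def pvLookup (xs : List (String × List String)) (k : String) : Option (List String) :=
  match xs with
  | [] => none
  | (a, b) :: t => if a == k then some b else pvLookup t k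

def find_close_friend_conspirator (conspiracies : List (String × List String)) (conspirators : List String) (distances : List (String × Int)) (n : Int) : List (String × String) :=
  let close_friends := (distances.filter (fun p => p.2 ≤ n && 0 < p.2)).map (·.1)
  (conspirators.foldl (fun acc c =>
      close_friends.foldl (fun acc f =>
        match pvLookup conspiracies f with
        | some ms => if c ∈ ms then acc.insert c f else acc
        | none => acc) acc)
    (PySem.Dict.empty : PySem.Dict String String)).items

-- ===== PORT B =====
def find_close_friend_conspirator_alt (conspiracies : List (String × List String)) (conspirators : List String) (distances : List (String × Int)) (n : Int) : List (String × String) :=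
  let want : PySem.Set String := PySem.Set.ofList conspirators
  let best := distances.foldl (fun best p =>
      if 0 < p.2 && p.2 ≤ n then
        match pvLookup conspiracies p.1 with
        | some ms =>
            ms.foldl (fun best m =>
              if PySem.Set.contains want m then best.insert m p.1 else best) best
        | none => best
      else best)
    (PySem.Dict.empty : PySem.Dict String String)
  (conspirators.foldl (fun acc c =>
      match best.get? c with
      | some f => acc.insert c f
      | none => acc)
    (PySem.Dict.empty : PySem.Dict String String)).items

-- ===== PRECONDITION & SPEC =====
def Spec_find_close_friend_conspirator (conspiracies : List (String × List String)) (conspirators : List String) (distances : List (String × Int)) (n : Int) (out : List (String × String)) : Prop := out = find_close_friend_conspirator_alt conspiracies conspirators distances n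
instance (conspiracies : List (String × List String)) (conspirators : List String) (distances : List (String × Int)) (n : Int) (out : List (String × String)) : Decidable (Spec_find_close_friend_conspirator conspiracies conspirators distances n out) := by unfold Spec_find_close_friend_conspirator; infer_instance

-- ===== CLAIM (what is proved, stated in full; the proofs are below) =====
def Claim_equal_find_close_friend_conspirator : Prop := ∀ (conspiracies : List (String × List String)) (conspirators : List String) (distances : List (String × Int)) (n : Int), Dom_find_close_friend_conspirator conspiracies conspirators distances n → Spec_find_close_friend_conspirator conspiracies conspirators distances n (find_close_friend_conspirator conspiracies conspirators distances n)

-- ===== LEMMAS AND PROOFS =====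

lemma pv_getLast?_cons {α : Type} (a : α) (l : List α) (h : l ≠ []) :
    (a :: l).getLast? = l.getLast? := by
  cases l with
  | nil => simp at h
  | cons b t => exact List.getLast?_cons_cons

-- Does conspirator c belong to the conspiracy of friend f?
def pvCond (conspiracies : List (String × List String)) (c f : String) : Bool :=
  match pvLookup conspiracies f with
  | some ms => decide (c ∈ ms)
  | none => false

-- last close friend sharing a conspiracy with c
def pvLast (conspiracies : List (String × List String)) (c : String) (fs : List String) : Option String :=
  (fs.filter (pvCond conspiracies c)).getLast?

lemma a_inner (conspiracies : List (String × List String)) (c : String) (fs : List String)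
    (acc : PySem.Dict String String) :
    fs.foldl (fun acc f =>
        match pvLookup conspiracies f with
        | some ms => if c ∈ ms then acc.insert c f else acc
        | none => acc) acc
      = match pvLast conspiracies c fs with
        | some f => acc.insert c f
        | none => acc := by
  induction fs generalizing acc with
  | nil => rfl
  | cons f t ih =>
    simp only [List.foldl_cons]
    by_cases hcd : pvCond conspiracies c f = true
    · have hstep : (match pvLookup conspiracies f with
        | some ms => if c ∈ ms then acc.insert c f else acc
        | none => acc) = acc.insert c f := by
        unfold pvCond at hcd
        cases h : pvLookup conspiracies f with
        | none => simp [h] at hcd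
        | some ms => simp [h] at hcd; simp [hcd]
      rw [hstep, ih]
      unfold pvLast
      rw [List.filter_cons, if_pos (by simpa using hcd)]
      cases hgl : (t.filter (pvCond conspiracies c)).getLast? with
      | none =>
        have : t.filter (pvCond conspiracies c) = [] := List.getLast?_eq_none_iff.mp hgl
        simp [this]
      | some g =>
        have hne : t.filter (pvCond conspiracies c) ≠ [] := by
          intro h; rw [h] at hgl; simp at hgl
        rw [pv_getLast?_cons _ _ hne, hgl]
        simp only [PySem.Dict.insert_insert_self]
    · have hstep : (match pvLookup conspiracies f with
        | some ms => if c ∈ ms then acc.insert c f else acc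
        | none => acc) = acc := by
        unfold pvCond at hcd
        cases h : pvLookup conspiracies f with
        | none => rfl
        | some ms => simp [h] at hcd; simp [hcd]
      rw [hstep, ih]
      simp [pvLast, hcd]

lemma b_inner (conspirators : List String)
    (c f : String) (hc : c ∈ conspirators) (ms : List String) (best : PySem.Dict String String) :
    (ms.foldl (fun best m =>
        if PySem.Set.contains (PySem.Set.ofList conspirators) m then best.insert m f else best)
      best).get? c
      = if c ∈ ms then some f else best.get? c := by
  induction ms generalizing best with
  | nil => simp
  | cons m t ih =>
    simp only [List.foldl_cons, ih]
    by_cases hct : c ∈ t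
    · simp [hct]
    · by_cases hmc : c = m
      · subst hmc
        simp [hct, hc]
      · have hni : c ∉ (m :: t) := by simp [hmc, hct]
        by_cases hw : m ∈ conspirators
        · simp [hni, hct, hw, PySem.Dict.get?_insert, hmc]
        · simp [hni, hct, hw]

lemma b_outer (conspiracies : List (String × List String)) (conspirators : List String)
    (n : Int) (c : String) (hc : c ∈ conspirators) (ds : List (String × Int))
    (best : PySem.Dict String String) :
    (ds.foldl (fun best p =>
        if 0 < p.2 && p.2 ≤ n then
          match pvLookup conspiracies p.1 with
          | some ms =>
              ms.foldl (fun best m =>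
                if PySem.Set.contains (PySem.Set.ofList conspirators) m then best.insert m p.1
                else best) best
          | none => best
        else best) best).get? c
      = match pvLast conspiracies c ((ds.filter (fun p => p.2 ≤ n && 0 < p.2)).map (·.1)) with
        | some f => some f
        | none => best.get? c := by
  induction ds generalizing best with
  | nil => rfl
  | cons p t ih =>
    simp only [List.foldl_cons, List.filter_cons]
    by_cases hrange : (p.2 ≤ n && 0 < p.2) = true
    · have hrange' : (0 < p.2 && p.2 ≤ n) = true := by
        rw [Bool.and_comm]; exact hrange
      rw [if_pos hrange', if_pos hrange]
      simp only [List.map_cons]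
      cases hlk : pvLookup conspiracies p.1 with
      | none =>
        rw [ih]
        have : pvCond conspiracies c p.1 = false := by simp [pvCond, hlk]
        simp [pvLast, this]
      | some ms =>
        rw [ih, b_inner conspirators c p.1 hc ms best]
        have hcond : pvCond conspiracies c p.1 = decide (c ∈ ms) := by simp [pvCond, hlk]
        unfold pvLast
        rw [List.filter_cons, hcond]
        by_cases hms : c ∈ ms
        · rw [if_pos hms, if_pos (show decide (c ∈ ms) = true by simp [hms])]
          cases hgl : (((t.filter (fun p => p.2 ≤ n && 0 < p.2)).map (·.1)).filter
              (pvCond conspiracies c)).getLast? with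
          | none =>
            have : ((t.filter (fun p => p.2 ≤ n && 0 < p.2)).map (·.1)).filter
                (pvCond conspiracies c) = [] := List.getLast?_eq_none_iff.mp hgl
            simp [this]
          | some g =>
            have hne : ((t.filter (fun p => p.2 ≤ n && 0 < p.2)).map (·.1)).filter
                (pvCond conspiracies c) ≠ [] := by
              intro h; rw [h] at hgl; simp at hgl
            rw [pv_getLast?_cons _ _ hne, hgl]
        · rw [if_neg hms, if_neg (show ¬ decide (c ∈ ms) = true by simp [hms])]
    · rw [if_neg (by rw [Bool.and_comm]; exact hrange), if_neg hrange, ih]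

theorem find_close_friend_conspirator_spec_aux (conspiracies : List (String × List String))
    (conspirators : List String) (distances : List (String × Int)) (n : Int) :
    find_close_friend_conspirator conspiracies conspirators distances n
      = find_close_friend_conspirator_alt conspiracies conspirators distances n := by
  unfold find_close_friend_conspirator find_close_friend_conspirator_alt
  dsimp only
  congr 1
  apply PySem.List.foldl_congr_mem
  intro acc c hc
  rw [a_inner, b_outer conspiracies conspirators n c hc]
  cases pvLast conspiracies c ((distances.filter (fun p => p.2 ≤ n && 0 < p.2)).map (·.1)) <;> simp

-- ===== VERDICT (by name: the statement is the Claim_ definition above) =====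
theorem find_close_friend_conspirator_spec : Claim_equal_find_close_friend_conspirator := by
  intro conspiracies conspirators distances n _
  exact find_close_friend_conspirator_spec_aux conspiracies conspirators distances n
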